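-- pv_equiv track=rewrite | github.com/JLWAI/HealthRAG | src/volume_prescription.py | distribute_volume_across_workouts
-- ===== SOURCE A (Python) =====
-- from typing import Dict, List, Tuple
--
-- def distribute_volume_across_workouts(
--     weekly_volume: int,
--     workouts_per_week: int
-- ) -> List[int]:
--     """
--     Distribute weekly volume across workout sessions.
--
--     Args:
--         weekly_volume: Total sets per week
--         workouts_per_week: How many times muscle is trained per week
--
--     Returns:
--         List of sets per workout
--
--     Example:
--     - 16 sets/week, 2 workouts → [8, 8]
--     - 17 sets/week, 2 workouts → [9, 8] (uneven distribution)
--     - 18 sets/week, 3 workouts → [6, 6, 6]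
--     """
--     base_sets = weekly_volume // workouts_per_week
--     remainder = weekly_volume % workouts_per_week
--
--     distribution = [base_sets] * workouts_per_week
--
--     # Distribute remainder across first N workouts
--     for i in range(remainder):
--         distribution[i] += 1
--
--     return distribution
-- ===== SOURCE B (Python) =====
-- def distribute_volume_across_workouts(
--     weekly_volume: int,
--     workouts_per_week: int
-- ):
--     # Closed form: workout i gets ceil((weekly_volume - i) / workouts_per_week)
--     # sets, i.e. (weekly_volume + workouts_per_week - 1 - i) // workouts_per_week,
--     # which is base+1 for the first `remainder` workouts and base afterwards.
--     return [
--         (weekly_volume + workouts_per_week - 1 - i) // workouts_per_week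
--         for i in range(workouts_per_week)
--     ]
-- ===== Notes on version B (the rewrite author's own statement) =====
-- stated objective: simpler
-- what changed: Replaces the build-then-patch scheme (replicate base, then a loop incrementing the first `remainder` entries) by a single comprehension computing each workout's sets with one closed-form floor division.
import Mathlib
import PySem

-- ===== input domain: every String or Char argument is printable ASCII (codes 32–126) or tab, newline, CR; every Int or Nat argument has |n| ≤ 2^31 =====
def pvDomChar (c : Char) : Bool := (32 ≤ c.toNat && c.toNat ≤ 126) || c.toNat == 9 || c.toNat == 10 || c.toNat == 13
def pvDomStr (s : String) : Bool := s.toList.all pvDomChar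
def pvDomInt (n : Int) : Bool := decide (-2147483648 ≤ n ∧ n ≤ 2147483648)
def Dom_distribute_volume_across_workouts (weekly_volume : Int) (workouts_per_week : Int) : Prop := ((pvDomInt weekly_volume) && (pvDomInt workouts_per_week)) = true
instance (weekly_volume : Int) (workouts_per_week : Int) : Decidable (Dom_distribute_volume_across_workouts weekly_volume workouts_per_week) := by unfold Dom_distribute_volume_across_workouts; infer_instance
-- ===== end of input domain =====

-- B replaces A's replicate-then-patch loop by one closed-form floor division per workout (simpler decomposition, same cost).


-- ===== PORT A =====
-- loop body of "distribution[i] += 1" (named so lemmas can refer to it)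
def pvIncrAt (l : List Int) (i : Int) : List Int := l.set i.toNat (l.getD i.toNat 0 + 1)

def distribute_volume_across_workouts (weekly_volume : Int) (workouts_per_week : Int) : List Int :=
  let base_sets := PySem.Int.floordiv weekly_volume workouts_per_week
  let remainder := PySem.Int.mod weekly_volume workouts_per_week
  let distribution := List.replicate workouts_per_week.toNat base_sets
  -- for i in range(remainder): distribution[i] += 1   (i is always in range when workouts_per_week ≠ 0)
  (PySem.List.pyRange 0 remainder).foldl pvIncrAt distribution

-- ===== PORT B =====
def distribute_volume_across_workouts_alt (weekly_volume : Int) (workouts_per_week : Int) : List Int :=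
  (PySem.List.pyRange 0 workouts_per_week).map
    (fun i => PySem.Int.floordiv (weekly_volume + workouts_per_week - 1 - i) workouts_per_week)

-- ===== PRECONDITION & SPEC =====
-- Pre_ excludes exactly workouts_per_week = 0, on which A raises ZeroDivisionError.
def Pre_distribute_volume_across_workouts (weekly_volume : Int) (workouts_per_week : Int) : Prop := workouts_per_week ≠ 0
instance (weekly_volume : Int) (workouts_per_week : Int) : Decidable (Pre_distribute_volume_across_workouts weekly_volume workouts_per_week) := by unfold Pre_distribute_volume_across_workouts; infer_instance
def pvWitness_distribute_volume_across_workouts : Int × Int := (17, 2)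

def Spec_distribute_volume_across_workouts (weekly_volume : Int) (workouts_per_week : Int) (out : List Int) : Prop := out = distribute_volume_across_workouts_alt weekly_volume workouts_per_week
instance (weekly_volume : Int) (workouts_per_week : Int) (out : List Int) : Decidable (Spec_distribute_volume_across_workouts weekly_volume workouts_per_week out) := by unfold Spec_distribute_volume_across_workouts; infer_instance

-- ===== CLAIM (what is proved, stated in full; the proofs are below) =====
def Claim_equal_distribute_volume_across_workouts : Prop := ∀ (weekly_volume : Int) (workouts_per_week : Int), Dom_distribute_volume_across_workouts weekly_volume workouts_per_week → Pre_distribute_volume_across_workouts weekly_volume workouts_per_week → Spec_distribute_volume_across_workouts weekly_volume workouts_per_week (distribute_volume_across_workouts weekly_volume workouts_per_week)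

-- ===== LEMMAS AND PROOFS =====

-- The increment loop preserves length.
lemma pvFold_length (xs : List Int) (l : List Int) :
    (xs.foldl pvIncrAt l).length = l.length := by
  induction xs generalizing l with
  | nil => rfl
  | cons x xs ih => rw [List.foldl_cons, ih]; simp [pvIncrAt]

-- Element-wise description of A's increment loop over range(k).
lemma pvFold_getElem? (k : Nat) (l : List Int) (hk : k ≤ l.length) (j : Nat) :
    (((List.range k).map (fun n : Nat => (n : Int))).foldl pvIncrAt l)[j]? =
    if j < k then l[j]?.map (· + 1) else l[j]? := by
  induction k with
  | zero => simp
  | succ k ih =>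
    rw [List.range_succ, List.map_append, List.foldl_append]
    have hk' : k ≤ l.length := Nat.le_of_succ_le hk
    have hlen : (((List.range k).map (fun n : Nat => (n : Int))).foldl pvIncrAt l).length = l.length :=
      pvFold_length _ _
    rw [List.map_cons, List.map_nil, List.foldl_cons, List.foldl_nil, pvIncrAt, Int.toNat_natCast]
    rcases Nat.lt_trichotomy j k with hj | hj | hj
    · rw [List.getElem?_set_ne (by omega), ih hk',
        if_pos hj, if_pos (by omega)]
    · subst hj
      have hjl : j < l.length := by omega
      rw [List.getElem?_set_self (by omega)]
      have hgd : (((List.range j).map (fun n : Nat => (n : Int))).foldl pvIncrAt l).getD j 0 = l[j] := by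
        rw [List.getD_eq_getElem?_getD, ih hk', if_neg (by omega),
          List.getElem?_eq_getElem hjl, Option.getD_some]
      rw [hgd, if_pos (by omega), List.getElem?_eq_getElem hjl, Option.map_some]
    · rw [List.getElem?_set_ne (by omega), ih hk',
        if_neg (by omega), if_neg (by omega)]

-- Closed-form division equals base/base+1 split.
lemma pvDiv_formula (v n i : Int) (hn : 0 < n) (hi0 : 0 ≤ i) (hin : i < n) :
    PySem.Int.floordiv (v + n - 1 - i) n =
    PySem.Int.floordiv v n + (if i < PySem.Int.mod v n then 1 else 0) := by
  have hvm := PySem.Int.floordiv_mul_add_mod v n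
  have hm0 := PySem.Int.mod_nonneg v hn
  have hml := PySem.Int.mod_lt v hn
  rw [PySem.Int.floordiv_eq_iff_of_pos hn]
  split_ifs with h
  · constructor <;> nlinarith
  · constructor <;> nlinarith

-- ===== VERDICT (by name: the statement is the Claim_ definition above) =====
theorem distribute_volume_across_workouts_spec : Claim_equal_distribute_volume_across_workouts := by
  intro v n _ hn
  unfold Spec_distribute_volume_across_workouts
  dsimp only [distribute_volume_across_workouts, distribute_volume_across_workouts_alt]
  rcases lt_or_gt_of_ne hn with hneg | hpos
  · -- n < 0: both sides are []
    have hr := (PySem.Int.mod_neg_bounds v hneg).2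
    rw [PySem.List.pyRange_one_eq_nil hr, PySem.List.pyRange_one_eq_nil (le_of_lt hneg)]
    simp [Int.toNat_of_nonpos (le_of_lt hneg)]
  · -- n > 0
    have hm0 := PySem.Int.mod_nonneg v hpos
    have hml := PySem.Int.mod_lt v hpos
    have hR : PySem.List.pyRange 0 (PySem.Int.mod v n) =
        (List.range (PySem.Int.mod v n).toNat).map (fun k : Nat => (k : Int)) := by
      conv_lhs => rw [show PySem.Int.mod v n = (((PySem.Int.mod v n).toNat : Nat) : Int) by omega]
      exact PySem.List.pyRange_zero_nat _
    have hN : PySem.List.pyRange 0 n = (List.range n.toNat).map (fun k : Nat => (k : Int)) := by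
      conv_lhs => rw [show n = ((n.toNat : Nat) : Int) by omega]
      exact PySem.List.pyRange_zero_nat _
    rw [hR, hN]
    apply List.ext_getElem?
    intro j
    have hlen : (List.replicate n.toNat (PySem.Int.floordiv v n)).length = n.toNat :=
      List.length_replicate
    rw [pvFold_getElem? (PySem.Int.mod v n).toNat _ (by rw [hlen]; omega) j]
    by_cases hj : j < n.toNat
    · rw [List.getElem?_map, List.getElem?_map,
        List.getElem?_range hj]
      rw [List.getElem?_replicate, if_pos hj]
      simp only [Option.map_some]
      rw [pvDiv_formula v n j hpos (by omega) (by omega)]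
      by_cases hjr : j < (PySem.Int.mod v n).toNat
      · rw [if_pos hjr, if_pos (by omega : (j : Int) < PySem.Int.mod v n)]
      · rw [if_neg hjr, if_neg (by omega : ¬ (j : Int) < PySem.Int.mod v n)]
        simp
    · have h1 : (List.replicate n.toNat (PySem.Int.floordiv v n))[j]? = none := by
        simp [hj]
      rw [h1]
      have h2 : ((((List.range n.toNat).map (fun k : Nat => (k : Int)))).map
          (fun i => PySem.Int.floordiv (v + n - 1 - i) n))[j]? = none := by
        apply List.getElem?_eq_none
        simpa using by omega
      rw [h2]
      simp
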